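-- pv_equiv track=rewrite | github.com/michaelcukier/Poker-Hand-Tracker | db_api/plots/range.py | create_freq_matrix
-- ===== SOURCE A (Python) =====
-- hand_matrix = [
--     ['AA', 'AKs', 'AQs', 'AJs', 'ATs', 'A9s', 'A8s', 'A7s', 'A6s', 'A5s', 'A4s', 'A3s', 'A2s'],
--     ['KAo', 'KK', 'KQs', 'KJs', 'KTs', 'K9s', 'K8s', 'K7s', 'K6s', 'K5s', 'K4s', 'K3s', 'K2s'],
--     ['QAo', 'QKo', 'QQ', 'QJs', 'QTs', 'Q9s', 'Q8s', 'Q7s', 'Q6s', 'Q5s', 'Q4s', 'Q3s', 'Q2s'],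
--     ['JAo', 'JKo', 'JQo', 'JJ', 'JTs', 'J9s', 'J8s', 'J7s', 'J6s', 'J5s', 'J4s', 'J3s', 'J2s'],
--     ['TAo', 'TKo', 'TQo', 'TJo', 'TT', 'T9s', 'T8s', 'T7s', 'T6s', 'T5s', 'T4s', 'T3s', 'T2s'],
--     ['9Ao', '9Ko', '9Qo', '9Jo', '9To', '99', '98s', '97s', '96s', '95s', '94s', '93s', '92s'],
--     ['8Ao', '8Ko', '8Qo', '8Jo', '8To', '89o', '88', '87s', '86s', '85s', '84s', '83s', '82s'],
--     ['7Ao', '7Ko', '7Qo', '7Jo', '7To', '79o', '78o', '77', '76s', '75s', '74s', '73s', '72s'],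
--     ['6Ao', '6Ko', '6Qo', '6Jo', '6To', '69o', '68o', '67o', '66', '65s', '64s', '63s', '62s'],
--     ['5Ao', '5Ko', '5Qo', '5Jo', '5To', '59o', '58o', '57o', '56o', '55', '54s', '53s', '52s'],
--     ['4Ao', '4Ko', '4Qo', '4Jo', '4To', '49o', '48o', '47o', '46o', '45o', '44', '43s', '42s'],
--     ['3Ao', '3Ko', '3Qo', '3Jo', '3To', '39o', '38o', '37o', '36o', '35o', '34o', '33', '32s'],
--     ['2Ao', '2Ko', '2Qo', '2Jo', '2To', '29o', '28o', '27o', '26o', '25o', '24o', '23o', '22']]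
--
-- def create_freq_matrix(freq: dict) -> list:
--     # creates a 13*13 matrix with each value set to the frequencies
--     matrix = [[0 for i in range(13)] for j in range(13)]
--
--     for i in freq:
--         for m in range(13):
--             b = 0
--             for n in range(13):
--                 if hand_matrix[m][n] == i:
--                     matrix[m][n] = freq[i]
--                     b = 1
--                     break
--             if b:
--                 break
--
--     return matrix
-- ===== SOURCE B (Python) =====
-- RANKS = 'AKQJT98765432'
--
-- def create_freq_matrix(freq: dict) -> list:
--     # closed form: derive each cell's hand name from the rank string instead of
--     # consulting the literal hand_matrix grid at all
--     matrix = []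
--     for m in range(13):
--         row = []
--         for n in range(13):
--             if m == n:
--                 name = RANKS[m] * 2
--             elif m < n:
--                 name = RANKS[m] + RANKS[n] + 's'
--             else:
--                 name = RANKS[m] + RANKS[n] + 'o'
--             row.append(freq.get(name, 0))
--         matrix.append(row)
--     return matrix
-- ===== Notes on version B (the rewrite author's own statement) =====
-- stated objective: faster
-- what changed: B derives each cell's hand name in closed form from the rank string 'AKQJT98765432' (pair / suited / offsuit by comparing row and column index) and fills the grid in one pass with freq.get(name, 0), instead of A's per-key nested scan of the literal hand_matrix with break flags; the grid literal is not consulted at all.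
import Mathlib
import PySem

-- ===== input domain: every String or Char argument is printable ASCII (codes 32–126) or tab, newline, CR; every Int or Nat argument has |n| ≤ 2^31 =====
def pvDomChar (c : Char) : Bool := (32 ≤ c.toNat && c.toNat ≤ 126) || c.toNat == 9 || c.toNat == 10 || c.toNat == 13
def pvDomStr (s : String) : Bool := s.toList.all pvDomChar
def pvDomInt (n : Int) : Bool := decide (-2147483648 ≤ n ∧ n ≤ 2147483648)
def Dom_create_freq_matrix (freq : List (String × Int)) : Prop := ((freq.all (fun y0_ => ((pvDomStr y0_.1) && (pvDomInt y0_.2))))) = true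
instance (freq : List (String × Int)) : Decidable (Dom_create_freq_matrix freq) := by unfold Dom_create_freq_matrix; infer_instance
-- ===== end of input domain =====

-- B derives each cell's hand name in closed form from the rank string (pair/suited/offsuit by index comparison) and fills the grid in one pass, instead of A's per-key scan of the literal grid.


def hand_matrix : List (List String) := [
  ["AA", "AKs", "AQs", "AJs", "ATs", "A9s", "A8s", "A7s", "A6s", "A5s", "A4s", "A3s", "A2s"],
  ["KAo", "KK", "KQs", "KJs", "KTs", "K9s", "K8s", "K7s", "K6s", "K5s", "K4s", "K3s", "K2s"],
  ["QAo", "QKo", "QQ", "QJs", "QTs", "Q9s", "Q8s", "Q7s", "Q6s", "Q5s", "Q4s", "Q3s", "Q2s"],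
  ["JAo", "JKo", "JQo", "JJ", "JTs", "J9s", "J8s", "J7s", "J6s", "J5s", "J4s", "J3s", "J2s"],
  ["TAo", "TKo", "TQo", "TJo", "TT", "T9s", "T8s", "T7s", "T6s", "T5s", "T4s", "T3s", "T2s"],
  ["9Ao", "9Ko", "9Qo", "9Jo", "9To", "99", "98s", "97s", "96s", "95s", "94s", "93s", "92s"],
  ["8Ao", "8Ko", "8Qo", "8Jo", "8To", "89o", "88", "87s", "86s", "85s", "84s", "83s", "82s"],
  ["7Ao", "7Ko", "7Qo", "7Jo", "7To", "79o", "78o", "77", "76s", "75s", "74s", "73s", "72s"],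
  ["6Ao", "6Ko", "6Qo", "6Jo", "6To", "69o", "68o", "67o", "66", "65s", "64s", "63s", "62s"],
  ["5Ao", "5Ko", "5Qo", "5Jo", "5To", "59o", "58o", "57o", "56o", "55", "54s", "53s", "52s"],
  ["4Ao", "4Ko", "4Qo", "4Jo", "4To", "49o", "48o", "47o", "46o", "45o", "44", "43s", "42s"],
  ["3Ao", "3Ko", "3Qo", "3Jo", "3To", "39o", "38o", "37o", "36o", "35o", "34o", "33", "32s"],
  ["2Ao", "2Ko", "2Qo", "2Jo", "2To", "29o", "28o", "27o", "26o", "25o", "24o", "23o", "22"]]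

-- ===== PORT A =====
-- inner 'for n in range(13): if hand_matrix[m][n] == i: …; b = 1; break' — scan the row for the first match, returning its column
def findN : List String → String → Nat → Option Nat
  | [], _, _ => none
  | c :: cs, i, n => if c == i then some n else findN cs i (n + 1)

-- outer 'for m in range(13): … if b: break' — on a row hit, write freq[i] into the cell and stop; else go to the next row
def rowLoopA (rows : List (List String)) (m : Nat) (i : String) (v : Int) (mat : List (List Int)) : List (List Int) :=
  match rows with
  | [] => mat
  | r :: rs =>
    match findN r i 0 with
    | some n => mat.set m ((mat.getD m []).set n v)
    | none => rowLoopA rs (m + 1) i v mat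

def create_freq_matrix (freq : List (String × Int)) : List (List Int) :=
  let matrix := (List.range 13).map (fun _ => (List.range 13).map (fun _ => (0 : Int)))
  freq.foldl (fun mat p => rowLoopA hand_matrix 0 p.1 (((PySem.Dict.mk freq).get? p.1).getD 0) mat) matrix

-- ===== PORT B =====
-- RANKS = 'AKQJT98765432'
def pvRanks : List Char := ['A', 'K', 'Q', 'J', 'T', '9', '8', '7', '6', '5', '4', '3', '2']

-- closed-form cell name: pair on the diagonal, suited above it, offsuit below it
def cellName (m n : Nat) : String :=
  let a := pvRanks.getD m ' '
  let b := pvRanks.getD n ' '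
  if m = n then String.mk [a, a]
  else if m < n then String.mk [a, b, 's']
  else String.mk [a, b, 'o']

def create_freq_matrix_alt (freq : List (String × Int)) : List (List Int) :=
  (List.range 13).map (fun m => (List.range 13).map (fun n => (PySem.Dict.mk freq).getD (cellName m n) 0))

-- ===== PRECONDITION & SPEC =====
def Spec_create_freq_matrix (freq : List (String × Int)) (out : List (List Int)) : Prop := out = create_freq_matrix_alt freq
instance (freq : List (String × Int)) (out : List (List Int)) : Decidable (Spec_create_freq_matrix freq out) := by unfold Spec_create_freq_matrix; infer_instance

-- ===== CLAIM (what is proved, stated in full; the proofs are below) =====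
def Claim_equal_create_freq_matrix : Prop := ∀ (freq : List (String × Int)), Dom_create_freq_matrix freq → Spec_create_freq_matrix freq (create_freq_matrix freq)

-- ===== LEMMAS AND PROOFS =====

-- functional description of A's two break-controlled loops: the (row, column) of the first cell equal to k
def locate : List (List String) → String → Option (Nat × Nat)
  | [], _ => none
  | r :: rs, k =>
    match findN r k 0 with
    | some n => some (0, n)
    | none => (locate rs k).map (fun p => (p.1 + 1, p.2))

def shaped (mat : List (List Int)) : Prop := mat.length = 13 ∧ ∀ r ∈ mat, r.length = 13

def getC (mat : List (List Int)) (m n : Nat) : Int := (mat.getD m []).getD n 0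

def nameAt (m n : Nat) : String := (hand_matrix.getD m []).getD n ""

lemma rowLoopA_eq (rows : List (List String)) (k : String) (v : Int) :
    ∀ (m : Nat) (mat : List (List Int)), rowLoopA rows m k v mat =
      match locate rows k with
      | some (dm, n) => mat.set (m + dm) ((mat.getD (m + dm) []).set n v)
      | none => mat := by
  induction rows with
  | nil => intro m mat; rfl
  | cons r rs ih =>
    intro m mat
    simp only [rowLoopA, locate]
    cases hf : findN r k 0 with
    | some n => simp
    | none =>
      rw [ih (m + 1) mat]
      cases hl : locate rs k with
      | none => simp
      | some p =>
        obtain ⟨dm, n⟩ := p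
        simp [Nat.add_assoc, Nat.add_comm 1 dm]

lemma findN_some {r : List String} {k : String} {n0 n : Nat}
    (h : findN r k n0 = some n) : ∃ j, n = n0 + j ∧ j < r.length ∧ r.getD j "" = k := by
  induction r generalizing n0 with
  | nil => simp [findN] at h
  | cons c cs ih =>
    simp only [findN] at h
    by_cases hc : c == k
    · simp [hc] at h
      exact ⟨0, by omega, by simp, by simpa using (eq_of_beq hc)⟩
    · simp [hc] at h
      obtain ⟨j, hj, hjl, hjv⟩ := ih h
      refine ⟨j + 1, by omega, by simpa using hjl, ?_⟩
      simpa [List.getD_eq_getElem?_getD] using hjv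

lemma locate_some {rows : List (List String)} {k : String} {m n : Nat}
    (h : locate rows k = some (m, n)) :
    m < rows.length ∧ n < (rows.getD m []).length ∧ (rows.getD m []).getD n "" = k := by
  induction rows generalizing m n with
  | nil => simp [locate] at h
  | cons r rs ih =>
    simp only [locate] at h
    cases hf : findN r k 0 with
    | some nf =>
      rw [hf] at h
      obtain ⟨hm, hn⟩ := Prod.mk.injEq .. ▸ Option.some.inj h
      obtain ⟨j, hj, hjl, hjv⟩ := findN_some hf
      have hnj : n = j := by omega
      subst hnj
      refine ⟨by rw [← hm]; simp, ?_, ?_⟩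
      · rw [← hm]; simpa using hjl
      · rw [← hm]; simpa using hjv
    | none =>
      rw [hf] at h
      cases hl : locate rs k with
      | none => rw [hl] at h; cases h
      | some q =>
        obtain ⟨m1, n1⟩ := q
        rw [hl] at h
        obtain ⟨hm, hn⟩ := Prod.mk.injEq .. ▸ Option.some.inj h
        obtain ⟨h1, h2, h3⟩ := ih hl
        subst hn
        refine ⟨by rw [← hm]; simpa using h1, ?_, ?_⟩
        · rw [← hm]; simpa using h2
        · rw [← hm]; simpa using h3

-- each grid name locates itself (169 decidable checks)
lemma locate_nameAt : ∀ m < 13, ∀ n < 13, locate hand_matrix (nameAt m n) = some (m, n) := by decide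

lemma hand_rows : ∀ m < 13, (hand_matrix.getD m []).length = 13 := by decide

-- B's closed-form name agrees with the grid name on every cell (169 decidable checks)
lemma cellName_eq_nameAt : ∀ m < 13, ∀ n < 13, cellName m n = nameAt m n := by decide

lemma shaped_set {mat : List (List Int)} (h : shaped mat) (m : Nat) (n : Nat) (v : Int) :
    shaped (mat.set m ((mat.getD m []).set n v)) := by
  obtain ⟨h1, h2⟩ := h
  by_cases hm : m < mat.length
  · refine ⟨by simpa using h1, ?_⟩
    intro r hr
    rcases List.mem_or_eq_of_mem_set hr with hmem | hset
    · exact h2 r hmem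
    · subst hset
      simp only [List.length_set]
      rw [List.getD_eq_getElem _ _ hm]
      exact h2 _ (List.getElem_mem hm)
  · rw [List.set_eq_of_length_le (by omega)]; exact ⟨h1, h2⟩

lemma getC_set {mat : List (List Int)} (h : shaped mat) {m n m' n' : Nat}
    (hm : m < 13) (hn : n < 13) (_hm' : m' < 13) (hn' : n' < 13) (v : Int) :
    getC (mat.set m ((mat.getD m []).set n v)) m' n' =
      if m' = m ∧ n' = n then v else getC mat m' n' := by
  obtain ⟨h1, h2⟩ := h
  have hml : m < mat.length := by omega
  have hrow : (mat.getD m []).length = 13 := by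
    rw [List.getD_eq_getElem _ _ hml]; exact h2 _ (List.getElem_mem hml)
  have hrow' : (mat[m]?.getD []).length = 13 := by rw [← List.getD_eq_getElem?_getD]; exact hrow
  by_cases he : m' = m
  · subst he
    simp only [getC, List.getD_eq_getElem?_getD, List.getElem?_set, hml, if_true,
      Option.getD_some, true_and]
    by_cases hne : n = n'
    · subst hne
      have hlt : n < (mat[m']?.getD []).length := by rw [hrow']; exact hn
      simp [hlt]
    · simp [hne, Ne.symm hne]
  · simp only [getC, List.getD_eq_getElem?_getD, List.getElem?_set,
      if_neg (fun hh : m = m' => he hh.symm), if_neg (fun hh : m' = m ∧ n' = n => he hh.1)]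

lemma getD_mk_not_mem {freq : List (String × Int)} {k : String}
    (h : k ∉ freq.map Prod.fst) : (PySem.Dict.mk freq).getD k 0 = 0 := by
  apply PySem.Dict.getD_of_not_contains
  rw [PySem.Dict.contains_eq_decide_mem_keys]
  simpa [PySem.Dict.keys] using h

lemma fold_cell (freq : List (String × Int)) :
    ∀ (l : List (String × Int)) (mat : List (List Int)), shaped mat →
      shaped (l.foldl (fun mat p => rowLoopA hand_matrix 0 p.1 (((PySem.Dict.mk freq).get? p.1).getD 0) mat) mat) ∧
      ∀ m < 13, ∀ n < 13,
        getC (l.foldl (fun mat p => rowLoopA hand_matrix 0 p.1 (((PySem.Dict.mk freq).get? p.1).getD 0) mat) mat) m n =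
          if nameAt m n ∈ l.map Prod.fst then (PySem.Dict.mk freq).getD (nameAt m n) 0 else getC mat m n := by
  intro l
  induction l with
  | nil => intro mat hs; exact ⟨hs, by simp⟩
  | cons p l ih =>
    intro mat hs
    simp only [List.foldl_cons]
    have hstep : shaped (rowLoopA hand_matrix 0 p.1 (((PySem.Dict.mk freq).get? p.1).getD 0) mat) ∧
        ∀ m < 13, ∀ n < 13, getC (rowLoopA hand_matrix 0 p.1 (((PySem.Dict.mk freq).get? p.1).getD 0) mat) m n =
          if p.1 = nameAt m n then (PySem.Dict.mk freq).getD (nameAt m n) 0 else getC mat m n := by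
      rw [rowLoopA_eq]
      cases hl : locate hand_matrix p.1 with
      | none =>
        refine ⟨hs, ?_⟩
        intro m hm n hn
        have hne : p.1 ≠ nameAt m n := by
          intro he; rw [he, locate_nameAt m hm n hn] at hl; cases hl
        simp [hne]
      | some q =>
        obtain ⟨dm, nn⟩ := q
        obtain ⟨hdm, hnn, hval⟩ := locate_some hl
        have hdm13 : dm < 13 := by simpa [hand_matrix] using hdm
        have hnn13 : nn < 13 := by rw [hand_rows dm hdm13] at hnn; exact hnn
        refine ⟨by simpa using shaped_set hs (0 + dm) nn _, ?_⟩
        intro m hm n hn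
        simp only [Nat.zero_add]
        rw [getC_set hs hdm13 hnn13 hm hn]
        by_cases he : p.1 = nameAt m n
        · have hloc := locate_nameAt m hm n hn
          rw [← he, hl] at hloc
          obtain ⟨hm1, hn1⟩ := Prod.mk.injEq .. ▸ Option.some.inj hloc
          rw [if_pos ⟨hm1.symm, hn1.symm⟩, if_pos he]
          rw [← PySem.Dict.getD_eq_get?_getD, he]
        · have hnot : ¬ (m = dm ∧ n = nn) := by
            rintro ⟨rfl, rfl⟩
            exact he hval.symm
          rw [if_neg hnot, if_neg he]
    obtain ⟨hs2, hcell⟩ := hstep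
    obtain ⟨hs3, hcell3⟩ := ih _ hs2
    refine ⟨hs3, ?_⟩
    intro m hm n hn
    rw [hcell3 m hm n hn, hcell m hm n hn]
    by_cases h1 : nameAt m n ∈ l.map Prod.fst
    · simp [h1]
    · by_cases h2 : p.1 = nameAt m n <;> simp [h1, h2, eq_comm]

lemma shaped_ext {X Y : List (List Int)} (hX : shaped X) (hY : shaped Y)
    (h : ∀ m < 13, ∀ n < 13, getC X m n = getC Y m n) : X = Y := by
  apply List.ext_getElem (hX.1.trans hY.1.symm)
  intro m hm1 hm2
  have hm : m < 13 := hX.1 ▸ hm1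
  apply List.ext_getElem
  · rw [hX.2 _ (List.getElem_mem hm1), hY.2 _ (List.getElem_mem hm2)]
  intro n hn1 hn2
  have hn : n < 13 := (hX.2 _ (List.getElem_mem hm1)) ▸ hn1
  have hc := h m hm n hn
  rwa [getC, getC, List.getD_eq_getElem _ _ hm1, List.getD_eq_getElem _ _ hm2,
    List.getD_eq_getElem _ _ hn1, List.getD_eq_getElem _ _ hn2] at hc

lemma matrix0_shaped : shaped ((List.range 13).map (fun _ => (List.range 13).map (fun _ => (0 : Int)))) := by
  constructor
  · simp
  · intro r hr
    simp only [List.mem_map] at hr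
    obtain ⟨_, _, rfl⟩ := hr
    simp

lemma matrix0_cell : ∀ m < 13, ∀ n < 13,
    getC ((List.range 13).map (fun _ => (List.range 13).map (fun _ => (0 : Int)))) m n = 0 := by decide

lemma alt_shaped (freq : List (String × Int)) : shaped (create_freq_matrix_alt freq) := by
  constructor
  · simp [create_freq_matrix_alt]
  · intro r hr
    simp only [create_freq_matrix_alt, List.mem_map] at hr
    obtain ⟨m, _, rfl⟩ := hr
    simp

lemma alt_cell (freq : List (String × Int)) : ∀ m < 13, ∀ n < 13,
    getC (create_freq_matrix_alt freq) m n = (PySem.Dict.mk freq).getD (nameAt m n) 0 := by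
  intro m hm n hn
  simp only [create_freq_matrix_alt, getC, List.getD_eq_getElem?_getD, List.getElem?_map,
    List.getElem?_range, hm, hn, Option.map_some, Option.getD_some]
  rw [cellName_eq_nameAt m hm n hn]

-- ===== VERDICT (by name: the statement is the Claim_ definition above) =====
theorem create_freq_matrix_spec : Claim_equal_create_freq_matrix := by
  intro freq _
  unfold Spec_create_freq_matrix create_freq_matrix
  obtain ⟨hsA, hcA⟩ := fold_cell freq freq _ matrix0_shaped
  apply shaped_ext hsA (alt_shaped freq)
  intro m hm n hn
  rw [hcA m hm n hn, alt_cell freq m hm n hn, matrix0_cell m hm n hn]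
  by_cases hmem : nameAt m n ∈ freq.map Prod.fst
  · simp [hmem]
  · simp [hmem, getD_mk_not_mem hmem]
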